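-- pv_equiv track=rewrite | github.com/matt-manes/scrapeTools | src/scrapetools/emailScraper.py | findLastValidCharacterOffset
-- ===== SOURCE A (Python) =====
-- from string import printable
--
-- def findLastValidCharacterOffset(text:str)->int:
--     """ Iterates through a string to find the index of the last valid character,
--     assuming that string either starts or ends with '@'.\n
--     If the string doesn't start or end with '@', an Exception is raised.\n
--     Returns the number of valid characters between '@' and first invalid character.
--     e.g. '@abcde%' will return 5 and '#123@' will return 3.\n
--     If no invalid characters are found, the function will return
--     'len(text)-1'."""
--
--     """ Technically some of these characters are valid in an email string,
--     but the ratio of how often they're used to how often they produce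
--     false positives makes them worth disregarding. """
--     invalidCharacters = ' <>[]{},"\':;\\/#$%^&*()=+`?|\n\t\r'
--     if text[-1] == '@' and text[0] != '@':
--         #reverse the string
--         text = text[::-1]
--     elif text[0] != '@':
--         raise Exception('First or last character of text arg needs to be "@"')
--     i = 1
--     while i < len(text):
--         if text[i] in invalidCharacters or text[i] not in printable:
--             return i - 1
--         else:
--             i += 1
--     return len(text)-1
-- ===== SOURCE B (Python) =====
-- from string import printable
--
-- def findLastValidCharacterOffset(text: str) -> int:
--     """Offset of the last valid character adjacent to the '@' anchor.
--     Different strategy: orient the string so it starts with '@', build the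
--     valid-character set once, and let str.lstrip eat the leading valid run
--     of text[1:]; the run length is the answer (len(text)-1 when all valid)."""
--     invalidCharacters = ' <>[]{},"\':;\\/#$%^&*()=+`?|\n\t\r'
--     if text[0] != '@':
--         if text[-1] != '@':
--             raise Exception('First or last character of text arg needs to be "@"')
--         text = text[::-1]
--     rest = text[1:]
--     valid = ''.join(c for c in printable if c not in invalidCharacters)
--     return len(rest) - len(rest.lstrip(valid))
-- ===== Notes on version B (the rewrite author's own statement) =====
-- stated objective: idiomatic
-- what changed: Replaces the manual index/while loop with computing the valid-character set once and measuring the leading valid run of text[1:] via str.lstrip (length difference), after the same '@' orientation.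
import Mathlib
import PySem

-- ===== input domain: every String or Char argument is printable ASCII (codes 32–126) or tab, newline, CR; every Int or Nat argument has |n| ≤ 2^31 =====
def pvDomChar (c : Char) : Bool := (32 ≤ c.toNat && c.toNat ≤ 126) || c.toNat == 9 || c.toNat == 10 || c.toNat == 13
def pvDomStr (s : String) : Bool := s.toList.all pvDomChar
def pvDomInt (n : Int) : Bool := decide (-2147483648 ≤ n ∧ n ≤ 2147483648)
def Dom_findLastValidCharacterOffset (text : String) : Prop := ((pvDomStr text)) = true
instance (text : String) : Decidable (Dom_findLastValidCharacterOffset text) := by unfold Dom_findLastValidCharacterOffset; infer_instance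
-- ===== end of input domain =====

-- B replaces A's manual index/while loop with a once-built valid-character set
-- and an lstrip-style leading-run measurement; return values proved equal on Pre_.

-- ===== PORT A =====
-- invalidCharacters = ' <>[]{},"\':;\\/#$%^&*()=+`?|\n\t\r'
def pvInvalidA : List Char := " <>[]{},\"':;\\/#$%^&*()=+`?|\n\t\r".toList
-- string.printable
def pvPrintableA : List Char := "0123456789abcdefghijklmnopqrstuvwxyzABCDEFGHIJKLMNOPQRSTUVWXYZ!\"#$%&'()*+,-./:;<=>?@[\\]^_`{|}~ \t\n\r\u000B\u000C".toList

-- the 'while i < len(text)' loop: cs is text[i:], i the index, len = len(text)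
def pvScanA (cs : List Char) (i : Int) (len : Int) : Int :=
  match cs with
  | [] => len - 1
  | c :: rest =>
      if pvInvalidA.contains c || !(pvPrintableA.contains c) then i - 1
      else pvScanA rest (i + 1) len

def findLastValidCharacterOffset (text : String) : Int :=
  match PySem.List.pyGet? text.toList (-1), PySem.List.pyGet? text.toList 0 with
  | some last, some first =>
      if last = '@' ∧ first ≠ '@' then
        -- text = text[::-1]  (reversal, cf. PySem.List.slice?_none_none_neg_one)
        pvScanA (text.toList.reverse.drop 1) 1 (text.toList.reverse.length : Int)
      else if first ≠ '@' then 0   -- raises Exception (excluded by Pre_)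
      else pvScanA (text.toList.drop 1) 1 (text.toList.length : Int)
  | _, _ => 0                      -- IndexError on empty text (excluded by Pre_)

-- ===== PORT B =====
def pvInvalidB : List Char := " <>[]{},\"':;\\/#$%^&*()=+`?|\n\t\r".toList
def pvPrintableB : List Char := "0123456789abcdefghijklmnopqrstuvwxyzABCDEFGHIJKLMNOPQRSTUVWXYZ!\"#$%&'()*+,-./:;<=>?@[\\]^_`{|}~ \t\n\r\u000B\u000C".toList
-- valid = ''.join(c for c in printable if c not in invalidCharacters)
def pvValidB : List Char := pvPrintableB.filter (fun c => !(pvInvalidB.contains c))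

-- len(rest) - len(rest.lstrip(valid)); lstrip(chars) drops the leading chars of the set (exact)
def pvRunB (rest : List Char) : Int :=
  (rest.length : Int) - ((rest.dropWhile (fun c => pvValidB.contains c)).length : Int)

def findLastValidCharacterOffset_alt (text : String) : Int :=
  match PySem.List.pyGet? text.toList 0 with
  | none => 0                      -- IndexError on empty text (excluded by Pre_)
  | some first =>
      if first ≠ '@' then
        match PySem.List.pyGet? text.toList (-1) with
        | none => 0
        | some last =>
            if last ≠ '@' then 0   -- raises Exception (excluded by Pre_)
            else pvRunB (text.toList.reverse.drop 1)
      else pvRunB (text.toList.drop 1)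

-- ===== PRECONDITION & SPEC =====
-- Pre_ excludes exactly the inputs where A raises: the empty string (IndexError at
-- text[-1]) and strings neither starting nor ending with '@' (explicit Exception).
def Pre_findLastValidCharacterOffset (text : String) : Prop :=
  text.toList ≠ [] ∧ (text.toList.head? = some '@' ∨ text.toList.getLast? = some '@')
instance (text : String) : Decidable (Pre_findLastValidCharacterOffset text) := by
  unfold Pre_findLastValidCharacterOffset; infer_instance
def pvWitness_findLastValidCharacterOffset : String := "@abc"

def Spec_findLastValidCharacterOffset (text : String) (out : Int) : Prop :=
  out = findLastValidCharacterOffset_alt text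
instance (text : String) (out : Int) : Decidable (Spec_findLastValidCharacterOffset text out) := by
  unfold Spec_findLastValidCharacterOffset; infer_instance

-- ===== CLAIM (what is proved, stated in full; the proofs are below) =====
def Claim_equal_findLastValidCharacterOffset : Prop :=
  ∀ (text : String), Dom_findLastValidCharacterOffset text →
    Pre_findLastValidCharacterOffset text →
    Spec_findLastValidCharacterOffset text (findLastValidCharacterOffset text)

-- ===== LEMMAS AND PROOFS =====

-- A's per-character test is the negation of B's validity test
theorem pv_cond_eq (c : Char) :
    (pvInvalidA.contains c || !(pvPrintableA.contains c)) = !(pvValidB.contains c) := by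
  have h : c ∈ pvValidB ↔ c ∈ pvPrintableA ∧ c ∉ pvInvalidA := by
    have hP : pvPrintableB = pvPrintableA := by unfold pvPrintableB pvPrintableA; rfl
    have hI : pvInvalidB = pvInvalidA := by unfold pvInvalidB pvInvalidA; rfl
    rw [pvValidB, hP, hI]
    simp [List.mem_filter, List.contains_eq_mem]
  by_cases hv : c ∈ pvValidB
  · obtain ⟨h1, h2⟩ := h.mp hv
    have e1 : pvInvalidA.contains c = false := by
      rw [List.contains_eq_mem]; exact decide_eq_false h2
    have e2 : pvPrintableA.contains c = true := by
      rw [List.contains_eq_mem]; exact decide_eq_true h1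
    have e3 : pvValidB.contains c = true := by
      rw [List.contains_eq_mem]; exact decide_eq_true hv
    rw [e1, e2, e3]; rfl
  · have e3 : pvValidB.contains c = false := by
      rw [List.contains_eq_mem]; exact decide_eq_false hv
    rw [e3]
    have hn : ¬(c ∈ pvPrintableA ∧ c ∉ pvInvalidA) := fun hh => hv (h.mpr hh)
    by_cases hp : c ∈ pvPrintableA
    · have hi : c ∈ pvInvalidA := by
        by_contra hni; exact hn ⟨hp, hni⟩
      have e1 : pvInvalidA.contains c = true := by
        rw [List.contains_eq_mem]; exact decide_eq_true hi
      rw [e1]; rfl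
    · have e2 : pvPrintableA.contains c = false := by
        rw [List.contains_eq_mem]; exact decide_eq_false hp
      rw [e2]
      simp

-- the while loop measures the leading run of p-valid characters (p abstract)
theorem pv_scan_gen (p : Char → Bool)
    (hcond : ∀ c, (pvInvalidA.contains c || !(pvPrintableA.contains c)) = !(p c))
    (l : List Char) (i : Int) :
    pvScanA l i (i + l.length) = i - 1 + ((l.takeWhile p).length : Int) := by
  induction l generalizing i with
  | nil => simp [pvScanA]
  | cons c rest ih =>
      have harith : i + ((c :: rest).length : Int) = (i + 1) + (rest.length : Int) := by
        simp only [List.length_cons]; push_cast; ring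
      rw [pvScanA, hcond c, harith]
      cases hc : p c with
      | false =>
          simp [hc]
      | true =>
          simp [hc, ih (i + 1)]
          try omega

theorem pv_scan_eq_run (l : List Char) :
    pvScanA l 1 (1 + (l.length : Int)) = pvRunB l := by
  have h := pv_scan_gen (fun c => pvValidB.contains c) pv_cond_eq l 1
  have h2 := congrArg List.length
    (List.takeWhile_append_dropWhile (p := fun c => pvValidB.contains c) (l := l))
  rw [List.length_append] at h2
  rw [pvRunB]
  omega

-- text[1:] of a nonempty oriented string
theorem pv_scan_eq_run' (l : List Char) (hl : l ≠ []) :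
    pvScanA (l.drop 1) 1 (l.length : Int) = pvRunB (l.drop 1) := by
  have hlen : l.length = (l.drop 1).length + 1 := by
    cases l with
    | nil => exact absurd rfl hl
    | cons c rest => simp
  rw [hlen]
  have : (((l.drop 1).length + 1 : Nat) : Int) = 1 + ((l.drop 1).length : Int) := by
    push_cast; ring
  rw [this]
  exact pv_scan_eq_run _

-- ===== VERDICT (by name: the statement is the Claim_ definition above) =====
theorem findLastValidCharacterOffset_spec : Claim_equal_findLastValidCharacterOffset := by
  intro text _ hpre
  obtain ⟨hne, hor⟩ := hpre
  unfold Spec_findLastValidCharacterOffset findLastValidCharacterOffset findLastValidCharacterOffset_alt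
  cases hcs : text.toList with
  | nil => exact absurd hcs hne
  | cons c rest =>
      rw [hcs] at hor
      obtain ⟨lastc, hl⟩ : ∃ x, (c :: rest).getLast? = some x :=
        Option.isSome_iff_exists.mp (List.getLast?_isSome.mpr (by simp))
      simp only [PySem.List.pyGet?_neg_one, PySem.List.pyGet?_zero, hl,
        List.getElem?_cons_zero]
      by_cases h1 : c = '@'
      · subst h1
        simpa using pv_scan_eq_run' (('@' : Char) :: rest) (by simp)
      · have h2 : lastc = '@' := by
          rcases hor with hor | hor
          · simp [h1] at hor
          · exact Option.some_inj.mp (hl.symm.trans hor)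
        subst h2
        simpa [h1] using pv_scan_eq_run' ((c :: rest).reverse) (by simp)
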